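-- pv_equiv track=rewrite | github.com/cmorett/SimCCD | analysis/compare_modes.py | find_matching_column
-- ===== SOURCE A (Python) =====
-- from typing import Dict, Iterable, List, Optional, Sequence, Tuple
--
-- def find_matching_column(columns: Sequence[str], candidates: Sequence[str]) -> Optional[str]:
--     lower_map = {c.lower(): c for c in columns}
--     for cand in candidates:
--         if cand in columns:
--             return cand
--     for cand in candidates:
--         key = cand.lower()
--         if key in lower_map:
--             return lower_map[key]
--     return None
-- ===== SOURCE B (Python) =====
-- def find_matching_column(columns, candidates):
--     lower_map = {c.lower(): c for c in columns}
--     fallback = None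
--     for cand in candidates:
--         if cand in columns:
--             return cand
--         if fallback is None and cand.lower() in lower_map:
--             fallback = lower_map[cand.lower()]
--     return fallback
-- ===== Notes on version B (the rewrite author's own statement) =====
-- stated objective: simpler
-- what changed: Fuses A's two separate scans over candidates into a single pass that returns exact matches immediately and keeps the first case-insensitive match in a fallback accumulator.
import Mathlib
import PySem

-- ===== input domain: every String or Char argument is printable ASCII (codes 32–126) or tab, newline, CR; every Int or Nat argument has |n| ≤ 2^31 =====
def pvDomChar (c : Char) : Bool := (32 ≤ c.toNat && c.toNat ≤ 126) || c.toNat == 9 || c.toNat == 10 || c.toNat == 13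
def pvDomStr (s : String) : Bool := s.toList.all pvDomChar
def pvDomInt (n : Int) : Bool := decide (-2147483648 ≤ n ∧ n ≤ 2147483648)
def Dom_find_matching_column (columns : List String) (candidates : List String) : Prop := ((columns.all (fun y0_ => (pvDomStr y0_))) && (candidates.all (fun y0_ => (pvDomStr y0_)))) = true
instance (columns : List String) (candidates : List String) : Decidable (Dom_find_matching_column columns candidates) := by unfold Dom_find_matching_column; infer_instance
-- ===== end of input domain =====

-- B fuses A's two separate scans over candidates into one pass with a fallback accumulator (objective: simpler).

-- ===== PORT A =====
-- first loop of A: return the first candidate that is an exact member of columns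
def fmcLoop1 (columns : List String) : List String → Option String
  | [] => none
  | cand :: rest =>
      if columns.contains cand then some cand else fmcLoop1 columns rest

-- second loop of A: return lower_map[cand.lower()] for the first candidate whose lowercase is a key
def fmcLoop2 (lower_map : PySem.Dict String String) : List String → Option String
  | [] => none
  | cand :: rest =>
      let key := PySem.Str.lower cand
      if (PySem.Dict.get? lower_map key).isSome then PySem.Dict.get? lower_map key
      else fmcLoop2 lower_map rest

def find_matching_column (columns : List String) (candidates : List String) : Option String :=
  let lower_map := columns.foldl (fun d c => PySem.Dict.insert d (PySem.Str.lower c) c) PySem.Dict.empty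
  match fmcLoop1 columns candidates with
  | some c => some c
  | none => fmcLoop2 lower_map candidates

-- ===== PORT B =====
-- B's single pass: exact match returns immediately; the first case-insensitive match is kept in fb
def fmcAltLoop (columns : List String) (lower_map : PySem.Dict String String) :
    List String → Option String → Option String
  | [], fb => fb
  | cand :: rest, fb =>
      if columns.contains cand then some cand
      else
        fmcAltLoop columns lower_map rest
          (if fb.isNone && (PySem.Dict.get? lower_map (PySem.Str.lower cand)).isSome then
            PySem.Dict.get? lower_map (PySem.Str.lower cand)
          else fb)

def find_matching_column_alt (columns : List String) (candidates : List String) : Option String :=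
  let lower_map := columns.foldl (fun d c => PySem.Dict.insert d (PySem.Str.lower c) c) PySem.Dict.empty
  fmcAltLoop columns lower_map candidates none

-- ===== PRECONDITION & SPEC =====
def Spec_find_matching_column (columns : List String) (candidates : List String) (out : Option String) : Prop := out = find_matching_column_alt columns candidates
instance (columns : List String) (candidates : List String) (out : Option String) : Decidable (Spec_find_matching_column columns candidates out) := by unfold Spec_find_matching_column; infer_instance

-- ===== CLAIM (what is proved, stated in full; the proofs are below) =====
def Claim_equal_find_matching_column : Prop := ∀ (columns : List String) (candidates : List String), Dom_find_matching_column columns candidates → Spec_find_matching_column columns candidates (find_matching_column columns candidates)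

-- ===== LEMMAS AND PROOFS =====

-- the fused loop equals: first exact match, else the fallback carried in, else the first ci match
theorem fmcAltLoop_eq (columns : List String) (lower_map : PySem.Dict String String) :
    ∀ (cs : List String) (fb : Option String),
      fmcAltLoop columns lower_map cs fb =
        match fmcLoop1 columns cs with
        | some c => some c
        | none => match fb with
          | some v => some v
          | none => fmcLoop2 lower_map cs := by
  intro cs
  induction cs with
  | nil => intro fb; cases fb <;> simp [fmcAltLoop, fmcLoop1, fmcLoop2]
  | cons cand rest ih =>
      intro fb
      by_cases h : cand ∈ columns
      · simp [fmcAltLoop, fmcLoop1, h]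
      · simp only [fmcAltLoop, fmcLoop1, fmcLoop2, List.contains_eq_mem, h, decide_false,
          Bool.false_eq_true, if_false]
        rw [ih]
        cases fb with
        | some v => simp
        | none =>
            cases hg : PySem.Dict.get? lower_map (PySem.Str.lower cand) with
            | some w => simp
            | none => simp

-- ===== VERDICT (by name: the statement is the Claim_ definition above) =====
theorem find_matching_column_spec : Claim_equal_find_matching_column := by
  intro columns candidates _
  unfold Spec_find_matching_column find_matching_column find_matching_column_alt
  rw [fmcAltLoop_eq]
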